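-- pv_equiv track=rewrite | github.com/saraywebster/aprendendo-python | order.py | getsmallerThan
-- ===== SOURCE A (Python) =====
-- def getsmallerThan(average, numbers):
--     smaller = []
--     for i in range(0, len(numbers)):
--         if numbers[i] < average:
--             if (smaller.count(numbers[i])) == 0 :
--                 smaller.append(numbers[i])
--     smaller.sort()
--     return smaller
-- ===== SOURCE B (Python) =====
-- def getsmallerThan(average, numbers):
--     smaller = sorted(x for x in numbers if x < average)
--     result = []
--     for x in smaller:
--         if not result or result[-1] != x:
--             result.append(x)
--     return result
-- ===== Notes on version B (the rewrite author's own statement) =====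
-- stated objective: faster
-- what changed: A dedups first via a linear count-membership scan inside the loop and sorts the deduped list; B keeps duplicates, sorts once, and dedups in a single pass by comparing each element with the previously appended one.
import Mathlib
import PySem

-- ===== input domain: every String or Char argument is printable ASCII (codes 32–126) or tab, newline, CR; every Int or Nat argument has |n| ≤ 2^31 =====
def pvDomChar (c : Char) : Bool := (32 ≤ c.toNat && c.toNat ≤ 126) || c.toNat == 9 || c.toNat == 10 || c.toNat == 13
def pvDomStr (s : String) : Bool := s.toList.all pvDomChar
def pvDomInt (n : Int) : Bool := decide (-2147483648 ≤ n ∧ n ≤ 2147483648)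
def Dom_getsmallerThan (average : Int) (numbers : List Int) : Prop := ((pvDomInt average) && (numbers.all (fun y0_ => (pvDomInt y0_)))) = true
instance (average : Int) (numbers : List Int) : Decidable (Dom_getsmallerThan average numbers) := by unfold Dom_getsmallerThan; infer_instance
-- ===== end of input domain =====

-- B filters (keeping duplicates), sorts once, then dedups in one adjacent-comparison pass,
-- removing A's O(n) count-membership scan per element (objective: faster).

-- ===== PORT A =====
def getsmallerThan (average : Int) (numbers : List Int) : List Int :=
  let smaller :=
    (PySem.List.pyRange 0 numbers.length 1).foldl
      (fun smaller i =>
        if PySem.List.pyGetD numbers i 0 < average then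
          if PySem.List.count smaller (PySem.List.pyGetD numbers i 0) == 0 then
            smaller ++ [PySem.List.pyGetD numbers i 0]
          else smaller
        else smaller) []
  PySem.List.sorted smaller (fun x => x) false

-- ===== PORT B =====
def getsmallerThan_alt (average : Int) (numbers : List Int) : List Int :=
  let smaller := PySem.List.sorted (numbers.filter (fun x => decide (x < average))) (fun x => x) false
  smaller.foldl
    (fun result x =>
      if result = [] ∨ PySem.List.pyGetD result (-1) 0 ≠ x then result ++ [x] else result) []

-- ===== PRECONDITION & SPEC =====
def Spec_getsmallerThan (average : Int) (numbers : List Int) (out : List Int) : Prop := out = getsmallerThan_alt average numbers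
instance (average : Int) (numbers : List Int) (out : List Int) : Decidable (Spec_getsmallerThan average numbers out) := by unfold Spec_getsmallerThan; infer_instance

-- ===== CLAIM (what is proved, stated in full; the proofs are below) =====
def Claim_equal_getsmallerThan : Prop := ∀ (average : Int) (numbers : List Int), Dom_getsmallerThan average numbers → Spec_getsmallerThan average numbers (getsmallerThan average numbers)

-- ===== LEMMAS AND PROOFS =====

-- A's loop body (after index elimination)
def stepA (average : Int) (smaller : List Int) (x : Int) : List Int :=
  if x < average then
    if PySem.List.count smaller x == 0 then smaller ++ [x] else smaller
  else smaller

-- B's loop body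
def stepB (result : List Int) (x : Int) : List Int :=
  if result = [] ∨ PySem.List.pyGetD result (-1) 0 ≠ x then result ++ [x] else result

-- membership in A's accumulator
theorem mem_foldlA (average : Int) (ns : List Int) (acc : List Int) (y : Int) :
    y ∈ ns.foldl (stepA average) acc ↔ y ∈ acc ∨ (y ∈ ns ∧ y < average) := by
  induction ns generalizing acc with
  | nil => simp
  | cons a t ih =>
    simp only [List.foldl_cons, ih, stepA]
    by_cases h1 : a < average
    · by_cases h2 : PySem.List.count acc a == 0
      · rw [if_pos h1, if_pos h2]
        simp only [List.mem_append, List.mem_cons, List.not_mem_nil, or_false]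
        constructor
        · rintro ((hy | rfl) | ⟨hy, hlt⟩)
          · exact Or.inl hy
          · exact Or.inr ⟨Or.inl rfl, h1⟩
          · exact Or.inr ⟨Or.inr hy, hlt⟩
        · rintro (hy | ⟨rfl | hy, hlt⟩)
          · exact Or.inl (Or.inl hy)
          · exact Or.inl (Or.inr rfl)
          · exact Or.inr ⟨hy, hlt⟩
      · have ha : a ∈ acc := by
          by_contra hna
          exact h2 (by simp [PySem.List.count_eq, List.count_eq_zero.mpr hna])
        rw [if_pos h1, if_neg h2]
        simp only [List.mem_cons]
        constructor
        · tauto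
        · rintro (hy | ⟨rfl | hy, hlt⟩)
          · exact Or.inl hy
          · exact Or.inl ha
          · exact Or.inr ⟨hy, hlt⟩
    · rw [if_neg h1]
      simp only [List.mem_cons]
      constructor
      · rintro (hy | ⟨hy, hlt⟩)
        · exact Or.inl hy
        · exact Or.inr ⟨Or.inr hy, hlt⟩
      · rintro (hy | ⟨rfl | hy, hlt⟩)
        · exact Or.inl hy
        · exact absurd hlt h1
        · exact Or.inr ⟨hy, hlt⟩

-- A's accumulator stays duplicate-free
theorem nodup_foldlA (average : Int) (ns : List Int) (acc : List Int) (h : acc.Nodup) :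
    (ns.foldl (stepA average) acc).Nodup := by
  induction ns generalizing acc with
  | nil => simpa
  | cons a t ih =>
    simp only [List.foldl_cons, stepA]
    by_cases h1 : a < average
    · by_cases h2 : PySem.List.count acc a == 0
      · have hna : a ∉ acc := by
          intro hmem
          simp [PySem.List.count_eq] at h2
          exact (List.count_pos_iff.mpr hmem).ne' h2
        rw [if_pos h1, if_pos h2]
        refine ih _ ?_
        rw [List.nodup_append]
        refine ⟨h, List.nodup_singleton _, ?_⟩
        intro b hb c hc e
        apply hna
        have hca : c = a := by simpa using hc
        rw [← hca, ← e]
        exact hb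
      · rw [if_pos h1, if_neg h2]
        exact ih _ h
    · rw [if_neg h1]
      exact ih _ h

-- membership in B's accumulator
theorem mem_foldlB (s : List Int) (r : List Int) (y : Int) :
    y ∈ s.foldl stepB r ↔ y ∈ r ∨ y ∈ s := by
  induction s generalizing r with
  | nil => simp
  | cons a t ih =>
    simp only [List.foldl_cons, stepB]
    by_cases hg : r = [] ∨ PySem.List.pyGetD r (-1) 0 ≠ a
    · rw [if_pos hg, ih]
      simp only [List.mem_append, List.mem_cons, List.not_mem_nil, or_false]
      tauto
    · have hg' := hg
      push_neg at hg'
      obtain ⟨hne, hlast⟩ := hg'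
      have ha : a ∈ r := by
        rw [← hlast, PySem.List.pyGetD_neg_one r 0 hne]
        exact List.getLast_mem hne
      rw [if_neg hg, ih]
      simp only [List.mem_cons]
      constructor
      · rintro (hy | hy)
        · exact Or.inl hy
        · exact Or.inr (Or.inr hy)
      · rintro (hy | rfl | hy)
        · exact Or.inl hy
        · exact Or.inl ha
        · exact Or.inr hy

-- B's accumulator is strictly increasing, given a ≤-sorted remaining input dominating it
theorem pairwise_foldlB (s : List Int) (r : List Int)
    (hs : s.Pairwise (· ≤ ·)) (hr : r.Pairwise (· < ·))
    (hconn : ∀ m ∈ r, ∀ y ∈ s, m ≤ y) :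
    (s.foldl stepB r).Pairwise (· < ·) := by
  induction s generalizing r with
  | nil => simpa
  | cons a t ih =>
    simp only [List.foldl_cons, stepB]
    rw [List.pairwise_cons] at hs
    obtain ⟨hat, ht⟩ := hs
    by_cases hg : r = [] ∨ PySem.List.pyGetD r (-1) 0 ≠ a
    · rw [if_pos hg]
      apply ih _ ht
      · rw [List.pairwise_append]
        refine ⟨hr, by simp, ?_⟩
        intro m hm b hb
        rw [show b = a from by simpa using hb]
        -- m < a : m ≤ a from hconn; strict via the last element
        rcases hg with hnil | hlast
        · subst hnil; simp at hm
        · rcases List.eq_nil_or_concat r with rfl | ⟨r₀, l, rfl⟩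
          · simp at hm
          · rw [List.concat_eq_append, PySem.List.pyGetD_neg_one_append_singleton] at hlast
            have hla : l ≤ a := hconn l (by simp) a (by simp)
            have hla' : l < a := lt_of_le_of_ne hla hlast
            rw [List.concat_eq_append, List.mem_append, List.mem_singleton] at hm
            rcases hm with hm | rfl
            · have : m < l := by
                rw [List.concat_eq_append, List.pairwise_append] at hr
                exact hr.2.2 m hm l (by simp)
              exact this.trans hla'
            · exact hla'
      · intro m hm y hy
        rw [List.mem_append, List.mem_singleton] at hm
        rcases hm with hm | rfl
        · exact hconn m hm y (List.mem_cons_of_mem _ hy)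
        · exact hat y hy
    · rw [if_neg hg]
      exact ih r ht hr (fun m hm y hy => hconn m hm y (List.mem_cons_of_mem _ hy))

-- ===== VERDICT (by name: the statement is the Claim_ definition above) =====
theorem getsmallerThan_spec : Claim_equal_getsmallerThan := by
  unfold Claim_equal_getsmallerThan Spec_getsmallerThan
  intro average numbers _
  unfold getsmallerThan getsmallerThan_alt
  simp only []
  rw [PySem.List.foldl_pyRange_zero_pyGetD' numbers (0:Int)
      (fun smaller x =>
        if x < average then
          if PySem.List.count smaller x == 0 then smaller ++ [x] else smaller
        else smaller) []]
  set filt := numbers.filter (fun x => decide (x < average)) with hfilt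
  set LA := numbers.foldl
      (fun smaller x =>
        if x < average then
          if PySem.List.count smaller x == 0 then smaller ++ [x] else smaller
        else smaller) [] with hLA
  set LB := (PySem.List.sorted filt (fun x => x) false).foldl
      (fun result x =>
        if result = [] ∨ PySem.List.pyGetD result (-1) 0 ≠ x then result ++ [x] else result) [] with hLB
  have hLA' : LA = numbers.foldl (stepA average) [] := by
    rw [hLA]; rfl
  have hLB' : LB = (PySem.List.sorted filt (fun x => x) false).foldl stepB [] := by
    rw [hLB]; rfl
  -- membership and nodup facts
  have hmemA : ∀ y, y ∈ LA ↔ y ∈ numbers ∧ y < average := by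
    intro y; rw [hLA', mem_foldlA]; simp
  have hnodA : LA.Nodup := by rw [hLA']; exact nodup_foldlA average numbers [] List.nodup_nil
  have hmemB : ∀ y, y ∈ LB ↔ y ∈ numbers ∧ y < average := by
    intro y
    rw [hLB', mem_foldlB]
    simp [PySem.List.mem_sorted, hfilt, List.mem_filter]
  have hpwB : LB.Pairwise (· < ·) := by
    rw [hLB']
    exact pairwise_foldlB _ [] (by simpa using PySem.List.sorted_pairwise filt (fun x => x))
      (by simp) (by simp)
  have hnodB : LB.Nodup := hpwB.imp ne_of_lt
  have hperm : LB.Perm LA := by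
    rw [List.perm_ext_iff_of_nodup hnodB hnodA]
    intro y; rw [hmemA, hmemB]
  have := PySem.List.sorted_eq_of_perm_of_pairwise_lt _ _ _ hperm (by simpa using hpwB)
  convert this.symm using 2
  exact this.symm
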